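-- pv_equiv track=rewrite | github.com/Peaceandmaths/Programming-project | P2.py | Exception_ACTG
-- ===== SOURCE A (Python) =====
-- def Exception_ACTG(string):
--     """Checks if the nucleotides string only contains allowed characters
--     input : string, sequence of nucleotides
--     output: True if there's malformed input, False if everything is ok"""
--     counter_errors = 0
--     for letter in string:
--         if letter not in ['A', 'a', 'c', 'C', 'T', 't', 'g', 'G', ' '] or not type(letter) == str:
--             counter_errors += 1
--             return True
--         else:
--             counter_errors = 0
--     if counter_errors == 0:
--         return False
-- ===== SOURCE B (Python) =====
-- def Exception_ACTG(string):
--     """Checks if the nucleotides string only contains allowed characters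
--     input : string, sequence of nucleotides
--     output: True if there's malformed input, False if everything is ok"""
--     return sum(string.count(ch) for ch in 'AaCcTtGg ') != len(string)
-- ===== Notes on version B (the rewrite author's own statement) =====
-- stated objective: alternative
-- what changed: Instead of scanning character-by-character with an early return, B counts the occurrences of each of the nine allowed characters with str.count and reports malformed input iff the total differs from the string length (valid since the allowed characters are pairwise distinct).
import Mathlib
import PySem

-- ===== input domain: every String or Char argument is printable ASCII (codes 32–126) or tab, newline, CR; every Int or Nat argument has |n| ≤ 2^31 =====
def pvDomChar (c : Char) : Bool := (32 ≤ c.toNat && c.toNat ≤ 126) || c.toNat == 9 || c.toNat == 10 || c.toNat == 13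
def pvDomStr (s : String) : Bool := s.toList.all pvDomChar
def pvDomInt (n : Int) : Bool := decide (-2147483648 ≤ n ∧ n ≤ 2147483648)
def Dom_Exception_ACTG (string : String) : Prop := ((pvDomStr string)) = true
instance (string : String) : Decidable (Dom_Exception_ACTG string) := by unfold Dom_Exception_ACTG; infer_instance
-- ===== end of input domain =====

-- B counts occurrences of each of the nine allowed characters and compares the total to the length (alternative algorithm).

-- ===== PORT A =====
-- the literal list A tests membership against
def pvAllowedListA : List Char := ['A', 'a', 'c', 'C', 'T', 't', 'g', 'G', ' ']

-- A's loop: carries counter_errors; returns True on the first disallowed letter,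
-- else resets the counter to 0 and continues; after the loop 'if counter == 0: return False'.
def pvLoopA : List Char → Int → Bool
  | [], counter => if counter == 0 then false else false
  | c :: rest, _counter =>
      if !pvAllowedListA.contains c then true   -- 'not type(letter) == str' is always False for a char of a str
      else pvLoopA rest 0

def Exception_ACTG (string : String) : Bool :=
  pvLoopA string.toList 0

-- ===== PORT B =====
-- sum(string.count(ch) for ch in 'AaCcTtGg ') != len(string)
def Exception_ACTG_alt (string : String) : Bool :=
  (("AaCcTtGg ".toList.map (fun ch => (PySem.Str.count string (String.ofList [ch]) : Int))).sum
    != (string.toList.length : Int))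

-- ===== PRECONDITION & SPEC =====
def Spec_Exception_ACTG (string : String) (out : Bool) : Prop := out = Exception_ACTG_alt string
instance (string : String) (out : Bool) : Decidable (Spec_Exception_ACTG string out) := by unfold Spec_Exception_ACTG; infer_instance

-- ===== CLAIM =====
def Claim_equal_Exception_ACTG : Prop := ∀ (string : String), Dom_Exception_ACTG string → Spec_Exception_ACTG string (Exception_ACTG string)

-- ===== LEMMAS AND PROOFS =====

-- PySem substring count with a single-character pattern is List.count
theorem pv_count_go_single (c : Char) (l : List Char) :
    ∀ fuel acc, l.length ≤ fuel →
      PySem.Chars.count.go [c] fuel l acc = acc + l.count c := by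
  induction l with
  | nil => intro fuel acc _; cases fuel <;> simp [PySem.Chars.count.go]
  | cons x t ih =>
      intro fuel acc hle
      cases fuel with
      | zero => simp at hle
      | succ n =>
          rw [List.length_cons] at hle
          by_cases hx : x = c
          · subst hx
            have hp : ([x].isPrefixOf (x :: t)) = true := by
              simp [List.isPrefixOf]
            simp only [PySem.Chars.count.go, hp, if_true, List.length_cons,
              List.drop_succ_cons, List.length_nil, List.drop_zero]
            rw [ih n (acc + 1) (by omega)]
            simp
            omega
          · have hb : ([c].isPrefixOf (x :: t)) = false := by
              simp only [List.isPrefixOf, Bool.and_true]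
              exact beq_eq_false_iff_ne.mpr (fun h => hx h.symm)
            simp only [PySem.Chars.count.go, hb]
            rw [ih n acc (by omega)]
            simp [hx]

theorem pv_count_single (s : String) (c : Char) :
    PySem.Str.count s (String.ofList [c]) = s.toList.count c := by
  simp only [PySem.Str.count, PySem.Chars.count, String.toList_ofList]
  rw [show ([c] : List Char).isEmpty = false from rfl]
  simpa using pv_count_go_single c s.toList s.toList.length 0 (le_refl _)

-- summing counts over the alphabet list = summing alphabet-multiplicity over l
theorem pv_count_map_sum (x : Char) (t : List Char) (al : List Char) :
    (al.map (fun ch => ((x :: t).count ch : Int))).sum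
      = (al.count x : Int) + (al.map (fun ch => (t.count ch : Int))).sum := by
  induction al with
  | nil => simp
  | cons a r ihr =>
      conv_lhs => rw [List.map_cons, List.sum_cons, ihr]
      conv_rhs => rw [List.map_cons, List.sum_cons]
      simp only [List.count_cons, beq_iff_eq]
      by_cases hax : x = a
      · subst hax; simp only [if_true]; push_cast; ring
      · rw [if_neg hax, if_neg (Ne.symm hax)]; push_cast; ring

theorem pv_sum_swap (al l : List Char) :
    (al.map (fun ch => (l.count ch : Int))).sum
      = (l.map (fun x => (al.count x : Int))).sum := by
  induction l with
  | nil => simp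
  | cons x t ih => rw [pv_count_map_sum, ih]; simp

-- multiplicity of x in B's (duplicate-free) alphabet is 1 iff A's membership test holds
theorem pv_mult_allowed (x : Char) :
    (("AaCcTtGg ".toList).count x : Int)
      = if pvAllowedListA.contains x then 1 else 0 := by
  have hmem : x ∈ "AaCcTtGg ".toList ↔ x ∈ pvAllowedListA := by
    show x ∈ ['A','a','C','c','T','t','G','g',' '] ↔ _
    simp only [pvAllowedListA, List.mem_cons, List.not_mem_nil]
    tauto
  by_cases h : pvAllowedListA.contains x
  · rw [if_pos h]
    have hx : x ∈ "AaCcTtGg ".toList := hmem.mpr (by simpa using h)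
    have hnd : ("AaCcTtGg ".toList).Nodup := by decide
    have h1 : ("AaCcTtGg ".toList).count x = 1 := List.count_eq_one_of_mem hnd hx
    omega
  · rw [if_neg h]
    have hx : x ∉ "AaCcTtGg ".toList := fun hm => h (by simpa using hmem.mp hm)
    exact_mod_cast List.count_eq_zero_of_not_mem hx

-- the 0/1 sum is at most the length …
theorem pv_sum01_le (l : List Char) :
    (l.map (fun x => if pvAllowedListA.contains x then (1 : Int) else 0)).sum ≤ (l.length : Int) := by
  induction l with
  | nil => simp
  | cons x t ih =>
      simp only [List.map_cons, List.sum_cons, List.length_cons]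
      split_ifs <;> push_cast <;> omega

-- … and equals it exactly when every character passes A's membership test
theorem pv_sum01_eq_len_iff (l : List Char) :
    ((l.map (fun x => if pvAllowedListA.contains x then (1 : Int) else 0)).sum = (l.length : Int))
      ↔ (l.all fun c => pvAllowedListA.contains c) = true := by
  induction l with
  | nil => simp
  | cons x t ih =>
      have ht := pv_sum01_le t
      simp only [List.map_cons, List.sum_cons, List.length_cons, List.all_cons,
        Bool.and_eq_true, ← ih]
      by_cases hx : pvAllowedListA.contains x
      · simp only [hx, if_pos]
        push_cast
        constructor
        · intro h; exact ⟨trivial, by omega⟩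
        · rintro ⟨-, h⟩; omega
      · simp only [hx, Bool.false_eq_true, false_and, iff_false, if_false]
        push_cast
        intro h
        omega

-- A's loop computes "some char fails the membership test", for any counter value
theorem pv_loopA_eq (l : List Char) (counter : Int) :
    pvLoopA l counter = !(l.all fun c => pvAllowedListA.contains c) := by
  induction l generalizing counter with
  | nil => simp [pvLoopA]
  | cons c rest ih =>
      simp only [pvLoopA, List.all_cons, List.contains_eq_mem]
      cases hd : decide (c ∈ pvAllowedListA) <;> simp [ih]

-- ===== VERDICT =====
theorem Exception_ACTG_spec : Claim_equal_Exception_ACTG := by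
  intro s _
  unfold Spec_Exception_ACTG Exception_ACTG Exception_ACTG_alt
  rw [pv_loopA_eq]
  have hmap : ("AaCcTtGg ".toList.map (fun ch => (PySem.Str.count s (String.ofList [ch]) : Int)))
      = "AaCcTtGg ".toList.map (fun ch => (s.toList.count ch : Int)) :=
    List.map_congr_left (fun c _ => by rw [pv_count_single])
  rw [hmap, pv_sum_swap]
  have hmap2 : (s.toList.map (fun x => (("AaCcTtGg ".toList).count x : Int)))
      = s.toList.map (fun x => if pvAllowedListA.contains x then (1 : Int) else 0) :=
    List.map_congr_left (fun x _ => pv_mult_allowed x)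
  rw [hmap2]
  cases h : (s.toList.all fun c => pvAllowedListA.contains c) with
  | false =>
      have hne : ((s.toList.map (fun x => if pvAllowedListA.contains x then (1 : Int) else 0)).sum
          ≠ (s.toList.length : Int)) := by
        intro heq
        have := (pv_sum01_eq_len_iff s.toList).mp heq
        rw [h] at this
        exact Bool.false_ne_true this
      rw [Bool.not_false]
      exact (bne_iff_ne.mpr hne).symm
  | true =>
      have heq := (pv_sum01_eq_len_iff s.toList).mpr h
      rw [heq]
      simp
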